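-- pv_equiv track=rewrite | github.com/IvayloArsov/softuni_python | python_fundamentals_2023/text_processing_exercises/2_character_multiplier.py | calculate_sum_of_multiplied_char_codes
-- ===== SOURCE A (Python) =====
-- def calculate_sum_of_multiplied_char_codes(str1, str2):
--     total_sum = 0
--     min_length = min(len(str1), len(str2))
--
--     for i in range(min_length):
--         total_sum += ord(str1[i]) * ord(str2[i])
--
--     # Add the remaining character codes if one string is longer than the other
--     if len(str1) > len(str2):
--         for i in range(min_length, len(str1)):
--             total_sum += ord(str1[i])
--     elif len(str2) > len(str1):
--         for i in range(min_length, len(str2)):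
--             total_sum += ord(str2[i])
--
--     return total_sum
-- ===== SOURCE B (Python) =====
-- def calculate_sum_of_multiplied_char_codes(str1, str2):
--     # One unified pass: pad both strings to the same length with chr(1)
--     # (whose code is 1, the multiplicative identity), so leftover characters
--     # of the longer string contribute exactly their own code.
--     fill = chr(1)
--     n = max(len(str1), len(str2))
--     return sum(ord(a) * ord(b) for a, b in zip(str1.ljust(n, fill), str2.ljust(n, fill)))
-- ===== Notes on version B (the rewrite author's own statement) =====
-- stated objective: idiomatic
-- what changed: Replaces the three-phase structure (min-length loop plus two length-comparison remainder branches/loops) with one unified pass: both strings are padded to equal length with chr(1) (code 1, the multiplicative identity) and the result is a single sum over the zipped pair.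
import Mathlib
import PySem

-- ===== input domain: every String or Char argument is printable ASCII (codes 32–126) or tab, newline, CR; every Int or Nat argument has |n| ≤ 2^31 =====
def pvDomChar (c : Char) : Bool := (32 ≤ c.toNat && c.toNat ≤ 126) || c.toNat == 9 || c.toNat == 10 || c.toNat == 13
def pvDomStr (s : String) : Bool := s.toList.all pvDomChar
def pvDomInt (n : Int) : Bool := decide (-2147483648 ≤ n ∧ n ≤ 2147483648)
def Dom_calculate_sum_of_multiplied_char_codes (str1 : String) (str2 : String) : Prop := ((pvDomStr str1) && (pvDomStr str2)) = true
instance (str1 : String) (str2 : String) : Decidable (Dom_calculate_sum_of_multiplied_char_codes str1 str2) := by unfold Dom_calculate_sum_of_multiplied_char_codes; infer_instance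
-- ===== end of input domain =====

-- B pads both strings to equal length with chr(1) (code 1) and sums products in one pass;
-- equivalence of the return value is proved on the whole domain (A is total).

-- ===== PORT A =====
-- literal transliteration: min-length loop of paired products, then one of two remainder loops
def calculate_sum_of_multiplied_char_codes (str1 : String) (str2 : String) : Int :=
  let l1 := str1.toList
  let l2 := str2.toList
  let min_length : Int := min (l1.length : Int) (l2.length : Int)
  let total_sum : Int :=
    (PySem.List.pyRange 0 min_length 1).foldl
      (fun s i => s + ((PySem.List.pyGetD l1 i ' ').toNat : Int) * ((PySem.List.pyGetD l2 i ' ').toNat : Int)) 0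
  if (l1.length : Int) > (l2.length : Int) then
    (PySem.List.pyRange min_length (l1.length : Int) 1).foldl
      (fun s i => s + ((PySem.List.pyGetD l1 i ' ').toNat : Int)) total_sum
  else if (l2.length : Int) > (l1.length : Int) then
    (PySem.List.pyRange min_length (l2.length : Int) 1).foldl
      (fun s i => s + ((PySem.List.pyGetD l2 i ' ').toNat : Int)) total_sum
  else total_sum

-- ===== PORT B =====
-- literal transliteration of Source B: pad with chr(1) to the max length, zip, sum of products
def calculate_sum_of_multiplied_char_codes_alt (str1 : String) (str2 : String) : Int :=
  let l1 := str1.toList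
  let l2 := str2.toList
  let n := max l1.length l2.length
  let p1 := l1 ++ List.replicate (n - l1.length) (Char.ofNat 1)
  let p2 := l2 ++ List.replicate (n - l2.length) (Char.ofNat 1)
  ((p1.zip p2).map (fun p => ((p.1.toNat : Int) * (p.2.toNat : Int)))).sum

-- ===== PRECONDITION & SPEC =====
def Spec_calculate_sum_of_multiplied_char_codes (str1 : String) (str2 : String) (out : Int) : Prop := out = calculate_sum_of_multiplied_char_codes_alt str1 str2
instance (str1 : String) (str2 : String) (out : Int) : Decidable (Spec_calculate_sum_of_multiplied_char_codes str1 str2 out) := by unfold Spec_calculate_sum_of_multiplied_char_codes; infer_instance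

-- ===== CLAIM (what is proved, stated in full; the proofs are below) =====
def Claim_equal_calculate_sum_of_multiplied_char_codes : Prop := ∀ (str1 : String) (str2 : String), Dom_calculate_sum_of_multiplied_char_codes str1 str2 → Spec_calculate_sum_of_multiplied_char_codes str1 str2 (calculate_sum_of_multiplied_char_codes str1 str2)

-- ===== LEMMAS AND PROOFS =====

-- sum of char codes of a list
def codesum (l : List Char) : Int := (l.map (fun c => (c.toNat : Int))).sum
-- sum of products of paired char codes
def zipsum (l1 l2 : List Char) : Int :=
  ((l1.zip l2).map (fun p => ((p.1.toNat : Int) * (p.2.toNat : Int)))).sum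

theorem zipsum_nil_left (l : List Char) : zipsum [] l = 0 := by simp [zipsum]
theorem zipsum_nil_right (l : List Char) : zipsum l [] = 0 := by simp [zipsum]
theorem zipsum_cons (a b : Char) (l1 l2 : List Char) :
    zipsum (a :: l1) (b :: l2) = (a.toNat : Int) * (b.toNat : Int) + zipsum l1 l2 := by
  simp [zipsum]

theorem zipsum_replicate_left (l : List Char) :
    zipsum (List.replicate l.length (Char.ofNat 1)) l = codesum l := by
  induction l with
  | nil => simp [zipsum, codesum]
  | cons b bs ih =>
      simp [List.replicate_succ, zipsum_cons, ih, codesum]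

theorem zipsum_replicate_right (l : List Char) :
    zipsum l (List.replicate l.length (Char.ofNat 1)) = codesum l := by
  induction l with
  | nil => simp [zipsum, codesum]
  | cons b bs ih =>
      simp [List.replicate_succ, zipsum_cons, ih, codesum]

-- B's padded zip sum, decomposed into A's three pieces
theorem padded_zipsum (l1 l2 : List Char) :
    zipsum (l1 ++ List.replicate (max l1.length l2.length - l1.length) (Char.ofNat 1))
           (l2 ++ List.replicate (max l1.length l2.length - l2.length) (Char.ofNat 1))
      = zipsum l1 l2 + codesum (l1.drop l2.length) + codesum (l2.drop l1.length) := by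
  induction l1 generalizing l2 with
  | nil =>
      simp [zipsum_nil_left, zipsum_replicate_left, codesum]
  | cons a as ih =>
      cases l2 with
      | nil =>
          simpa [zipsum_nil_right, codesum] using zipsum_replicate_right (a :: as)
      | cons b bs =>
          have hmax : max (a :: as).length (b :: bs).length
              = max as.length bs.length + 1 := by
            simp [Nat.succ_max_succ]
          rw [hmax]
          simp only [List.length_cons, Nat.succ_sub_succ, List.cons_append,
            zipsum_cons, List.drop_succ_cons]
          rw [ih bs]
          ring

-- A's index loop over range(min) is the zip sum
theorem range_min_zipsum (l1 l2 : List Char) (d : Char) :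
    ((List.range (min l1.length l2.length)).map
      (fun k => ((l1.getD k d).toNat : Int) * ((l2.getD k d).toNat : Int))).sum
      = zipsum l1 l2 := by
  induction l1 generalizing l2 with
  | nil => simp [zipsum_nil_left]
  | cons a as ih =>
      cases l2 with
      | nil => simp [zipsum_nil_right]
      | cons b bs =>
          have : min (a :: as).length (b :: bs).length = min as.length bs.length + 1 := by
            simp [Nat.succ_min_succ]
          rw [this, List.range_succ_eq_map, zipsum_cons, ← ih bs]
          simp [List.map_map, Function.comp_def]

-- A's remainder loop over range(min, len(l)) adds the code sum of the dropped suffix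
theorem tail_loop (l : List Char) (m t : Int) (hm : 0 ≤ m) :
    (PySem.List.pyRange m (l.length : Int) 1).foldl
      (fun s i => s + ((PySem.List.pyGetD l i ' ').toNat : Int)) t
      = t + codesum (l.drop m.toNat) := by
  have h := PySem.List.foldl_pyRange_pyGetD' (xs := l) (d := ' ')
    (f := fun acc c => acc + ((c.toNat : Int))) (init := t) (a := m) hm
  rw [h, PySem.List.foldl_add]
  rfl

theorem calculate_sum_of_multiplied_char_codes_spec' (str1 str2 : String) :
    calculate_sum_of_multiplied_char_codes str1 str2
      = calculate_sum_of_multiplied_char_codes_alt str1 str2 := by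
  simp only [calculate_sum_of_multiplied_char_codes, calculate_sum_of_multiplied_char_codes_alt,
    gt_iff_lt]
  set l1 := str1.toList with hl1
  set l2 := str2.toList with hl2
  have hmin : (min (l1.length : Int) (l2.length : Int)) = ((min l1.length l2.length : Nat) : Int) := by
    push_cast; rfl
  have hloop1 : (PySem.List.pyRange 0 (min (l1.length : Int) (l2.length : Int)) 1).foldl
      (fun s i => s + ((PySem.List.pyGetD l1 i ' ').toNat : Int) * ((PySem.List.pyGetD l2 i ' ').toNat : Int)) 0
      = zipsum l1 l2 := by
    rw [hmin, ← range_min_zipsum l1 l2 ' ', PySem.List.pyRange_one, List.foldl_map,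
      PySem.List.foldl_add]
    simp
    rw [hmin, Int.toNat_natCast]
  have hfold : (((l1 ++ List.replicate (max l1.length l2.length - l1.length) (Char.ofNat 1)).zip
        (l2 ++ List.replicate (max l1.length l2.length - l2.length) (Char.ofNat 1))).map
        (fun p => ((p.1.toNat : Int) * (p.2.toNat : Int)))).sum
      = zipsum (l1 ++ List.replicate (max l1.length l2.length - l1.length) (Char.ofNat 1))
          (l2 ++ List.replicate (max l1.length l2.length - l2.length) (Char.ofNat 1)) := rfl
  rw [hfold, padded_zipsum l1 l2]
  have hm0 : (0 : Int) ≤ min (l1.length : Int) (l2.length : Int) := by omega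
  split_ifs with h1 h2
  · rw [hloop1, tail_loop l1 _ _ hm0]
    have hd : (min (l1.length : Int) (l2.length : Int)).toNat = l2.length := by omega
    have h0 : l2.drop l1.length = [] := List.drop_eq_nil_of_le (by omega)
    rw [hd, h0]
    simp [codesum]
  · rw [hloop1, tail_loop l2 _ _ hm0]
    have hd : (min (l1.length : Int) (l2.length : Int)).toNat = l1.length := by omega
    have h0 : l1.drop l2.length = [] := List.drop_eq_nil_of_le (by omega)
    rw [hd, h0]
    simp [codesum]
  · have heq : l1.length = l2.length := by omega
    rw [hloop1]
    have h0 : l1.drop l2.length = [] := List.drop_eq_nil_of_le (by omega)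
    have h0' : l2.drop l1.length = [] := List.drop_eq_nil_of_le (by omega)
    rw [h0, h0']
    simp [codesum]

-- ===== VERDICT (by name: the statement is the Claim_ definition above) =====
theorem calculate_sum_of_multiplied_char_codes_spec : Claim_equal_calculate_sum_of_multiplied_char_codes := by
  intro str1 str2 _
  exact calculate_sum_of_multiplied_char_codes_spec' str1 str2
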